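-- pv_equiv track=rewrite | github.com/Coloquinte/1DTransport | transportation.py | cleanup_events
-- ===== SOURCE A (Python) =====
-- def cleanup_events(events):
--     """
--     Sort and uniquify a set of (position, slope) events
--     """
--     d = dict()
--     for p, s in events:
--         if p in d:
--             d[p] += s
--         else:
--             d[p] = s
--     return sorted(d.items())
-- ===== SOURCE B (Python) =====
-- def cleanup_events(events):
--     """
--     Sort and uniquify a set of (position, slope) events
--     """
--     res = []
--     for p, s in sorted(events, key=lambda e: e[0]):
--         if res and res[-1][0] == p:
--             res[-1] = (res[-1][0], res[-1][1] + s)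
--         else:
--             res.append((p, s))
--     return res
-- ===== Notes on version B (the rewrite author's own statement) =====
-- stated objective: alternative
-- what changed: Instead of accumulating slopes in a dict and sorting its items at the end, B stably sorts the events by position once and then groups equal-position runs in a single left-to-right scan, merging each run's slopes into the last result entry.
import Mathlib
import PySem

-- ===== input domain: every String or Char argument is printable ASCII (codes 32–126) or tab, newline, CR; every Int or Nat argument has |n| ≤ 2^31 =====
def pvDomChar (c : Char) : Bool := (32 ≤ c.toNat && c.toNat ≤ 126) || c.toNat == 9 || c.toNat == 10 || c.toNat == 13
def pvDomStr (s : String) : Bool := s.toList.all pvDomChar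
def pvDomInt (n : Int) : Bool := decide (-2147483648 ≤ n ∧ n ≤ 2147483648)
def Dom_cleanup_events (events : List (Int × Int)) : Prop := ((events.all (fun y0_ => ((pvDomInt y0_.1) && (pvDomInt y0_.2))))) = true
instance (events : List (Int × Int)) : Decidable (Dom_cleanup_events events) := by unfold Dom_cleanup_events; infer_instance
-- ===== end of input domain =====

-- B replaces A's dict accumulation + final sort of the items by a single stable sort by
-- position followed by a linear grouping scan; same result, alternative decomposition.

-- ===== PORT A =====
-- d = {}; for p, s in events: d[p] += s if p in d else d[p] = s; return sorted(d.items())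
def cleanup_events (events : List (Int × Int)) : List (Int × Int) :=
  let d : PySem.Dict Int Int := events.foldl
    (fun d e => if d.contains e.1 then d.modify e.1 0 (fun v => v + e.2) else d.insert e.1 e.2)
    PySem.Dict.empty
  PySem.List.sorted2 d.items Prod.fst Prod.snd false

-- ===== PORT B =====
-- one step of B's loop: merge the event into the last result entry if the positions match
def stepB (res : List (Int × Int)) (e : Int × Int) : List (Int × Int) :=
  match res.getLast? with
  | some l => if l.1 = e.1 then res.dropLast ++ [(l.1, l.2 + e.2)] else res ++ [e]
  | none => res ++ [e]

def cleanup_events_alt (events : List (Int × Int)) : List (Int × Int) :=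
  (PySem.List.sorted events (fun e => e.1) false).foldl stepB []

-- ===== PRECONDITION & SPEC =====
def Spec_cleanup_events (events : List (Int × Int)) (out : List (Int × Int)) : Prop := out = cleanup_events_alt events
instance (events : List (Int × Int)) (out : List (Int × Int)) : Decidable (Spec_cleanup_events events out) := by unfold Spec_cleanup_events; infer_instance

-- ===== CLAIM (what is proved, stated in full; the proofs are below) =====
def Claim_equal_cleanup_events : Prop := ∀ (events : List (Int × Int)), Dom_cleanup_events events → Spec_cleanup_events events (cleanup_events events)

-- ===== LEMMAS AND PROOFS =====

-- total slope at position p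
def sumAt (p : Int) (l : List (Int × Int)) : Int :=
  ((l.filter (fun y => y.1 == p)).map (fun y => y.2)).sum

-- group a (position-)sorted list of events: one pair per run of equal positions
def g : List (Int × Int) → List (Int × Int)
  | [] => []
  | e :: rest =>
    (e.1, e.2 + ((rest.takeWhile (fun y => y.1 == e.1)).map (fun y => y.2)).sum)
      :: g (rest.dropWhile (fun y => y.1 == e.1))
termination_by l => l.length
decreasing_by
  simp only [List.length_cons]
  exact Nat.lt_succ_of_le (List.length_dropWhile_le _ _)

-- canonical result: sorted distinct positions, each with its total slope
def canon (events : List (Int × Int)) : List (Int × Int) :=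
  (PySem.List.sorted (PySem.Set.ofList (events.map (fun e => e.1))) (fun x => x) false).map
    (fun p => (p, sumAt p events))

theorem sumAt_cons (p : Int) (y : Int × Int) (l : List (Int × Int)) :
    sumAt p (y :: l) = (if y.1 = p then y.2 else 0) + sumAt p l := by
  simp only [sumAt, List.filter_cons]
  by_cases h : y.1 = p <;> simp [h]

-- ---- A side ----

theorem foldA_eq (events : List (Int × Int)) :
    events.foldl
      (fun d e => if d.contains e.1 then d.modify e.1 0 (fun v => v + e.2) else d.insert e.1 e.2)
      PySem.Dict.empty
    = events.foldl (fun d e => d.modify e.1 0 (fun v => v + e.2)) PySem.Dict.empty := by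
  have hfun : (fun (d : PySem.Dict Int Int) (e : Int × Int) =>
      if d.contains e.1 then d.modify e.1 0 (fun v => v + e.2) else d.insert e.1 e.2)
      = fun d e => d.modify e.1 0 (fun v => v + e.2) := by
    funext d e
    by_cases h : d.contains e.1
    · simp [h]
    · simp only [h, Bool.false_eq_true, if_false]
      rw [PySem.Dict.modify, PySem.Dict.getD_of_not_contains d 0 (by simpa using h)]
      simp
  rw [hfun]

theorem keysA (events : List (Int × Int)) :
    (events.foldl (fun d e => d.modify e.1 0 (fun v => v + e.2)) PySem.Dict.empty).keys
      = PySem.Set.ofList (events.map (fun e => e.1)) := by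
  have := PySem.Dict.keys_foldl_modify_key (ν := Int) events (fun e => e.1) 0
      (fun _ e v => v + e.2) PySem.Dict.empty
  simpa [PySem.Set.ofList, PySem.Set.update, PySem.Set.empty] using this

theorem nodupA (events : List (Int × Int)) :
    (events.foldl (fun d e => d.modify e.1 0 (fun v => v + e.2)) PySem.Dict.empty).keys.Nodup := by
  exact PySem.Dict.nodup_keys_foldl_modify_key (ν := Int) events (fun e => e.1) 0
      (fun _ e v => v + e.2) PySem.Dict.empty (by simp)

theorem getDA (l : List (Int × Int)) (d : PySem.Dict Int Int) (p : Int) :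
    (l.foldl (fun d e => d.modify e.1 0 (fun v => v + e.2)) d).getD p 0
      = d.getD p 0 + sumAt p l := by
  induction l generalizing d with
  | nil => simp [sumAt]
  | cons y l ih =>
    simp only [List.foldl_cons, ih, sumAt_cons, PySem.Dict.getD_modify]
    by_cases h : p = y.1
    · subst h
      rw [if_pos rfl, if_pos rfl]
      ring
    · rw [if_neg h, if_neg (fun hh => h hh.symm)]
      ring

theorem itemsA (events : List (Int × Int)) :
    (events.foldl (fun d e => d.modify e.1 0 (fun v => v + e.2)) PySem.Dict.empty).items
      = (PySem.Set.ofList (events.map (fun e => e.1))).map (fun p => (p, sumAt p events)) := by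
  rw [PySem.Dict.items_eq_map_keys _ (nodupA events) 0, keysA]
  refine List.map_congr_left (fun k _ => ?_)
  simp [getDA]

-- insertBy only looks at comparisons of the inserted element against list members
theorem insertBy_congr {α : Type} (b1 b2 : α → α → Bool) (x : α) (ys : List α)
    (h : ∀ y ∈ ys, b1 x y = b2 x y) : PySem.List.insertBy b1 x ys = PySem.List.insertBy b2 x ys := by
  induction ys with
  | nil => rfl
  | cons y ys ih =>
    simp only [PySem.List.insertBy, h y (by simp)]
    by_cases hb : b2 x y
    · simp [hb]
    · simp only [hb, Bool.false_eq_true, if_false, List.cons.injEq, true_and]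
      exact ih (fun z hz => h z (by simp [hz]))

theorem mem_of_mem_insertBy {α : Type} (b : α → α → Bool) (x y : α) (ys : List α)
    (h : y ∈ PySem.List.insertBy b x ys) : y = x ∨ y ∈ ys := by
  exact (PySem.List.mem_insertBy b x y ys).1 h

theorem foldl_insertBy_congr {α : Type} (b1 b2 : α → α → Bool) (S : List α)
    (hS : ∀ x ∈ S, ∀ y ∈ S, b1 x y = b2 x y) :
    ∀ (l acc : List α), (∀ x ∈ l, x ∈ S) → (∀ y ∈ acc, y ∈ S) →
      l.foldl (fun acc x => PySem.List.insertBy b1 x acc) acc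
        = l.foldl (fun acc x => PySem.List.insertBy b2 x acc) acc := by
  intro l
  induction l with
  | nil => intro acc _ _; rfl
  | cons x l ih =>
    intro acc hl hacc
    have hx : x ∈ S := hl x (by simp)
    have hstep : PySem.List.insertBy b1 x acc = PySem.List.insertBy b2 x acc :=
      insertBy_congr b1 b2 x acc (fun y hy => hS x hx y (hacc y hy))
    simp only [List.foldl_cons, hstep]
    exact ih _ (fun z hz => hl z (by simp [hz]))
      (fun y hy => (mem_of_mem_insertBy b2 x y acc hy).elim (fun e => e ▸ hx) (hacc y))

theorem sorted2_eq_sorted_of_fst_inj (xs : List (Int × Int))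
    (h : ∀ a ∈ xs, ∀ b ∈ xs, a.1 = b.1 → a = b) :
    PySem.List.sorted2 xs Prod.fst Prod.snd false = PySem.List.sorted xs Prod.fst false := by
  show xs.foldl (fun acc x => PySem.List.insertBy
      (fun a b => decide (a.1 < b.1) || !decide (b.1 < a.1) && decide (a.2 < b.2)) x acc) []
    = xs.foldl (fun acc x => PySem.List.insertBy (fun a b => decide (a.1 < b.1)) x acc) []
  refine foldl_insertBy_congr _ _ xs ?_ xs [] (fun _ hx => hx) (by simp)
  intro a ha b hb
  rcases lt_trichotomy a.1 b.1 with hlt | heq | hgt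
  · simp [hlt]
  · have hab : a = b := h a ha b hb heq
    subst hab
    simp
  · simp [hgt, not_lt_of_gt hgt]

theorem pairwise_canon (events : List (Int × Int)) :
    (canon events).Pairwise (fun a b => a.1 < b.1) := by
  unfold canon
  rw [List.pairwise_map]
  exact PySem.List.sorted_ofList_pairwise_lt _

theorem canon_perm_items (events : List (Int × Int)) :
    (canon events).Perm
      ((PySem.Set.ofList (events.map (fun e => e.1))).map (fun p => (p, sumAt p events))) := by
  exact (PySem.List.sorted_perm _ _ _).map _

theorem A_eq_canon (events : List (Int × Int)) : cleanup_events events = canon events := by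
  unfold cleanup_events
  rw [foldA_eq]
  have hinj : ∀ a ∈ (events.foldl (fun d e => d.modify e.1 0 (fun v => v + e.2)) PySem.Dict.empty).items,
      ∀ b ∈ (events.foldl (fun d e => d.modify e.1 0 (fun v => v + e.2)) PySem.Dict.empty).items,
      a.1 = b.1 → a = b := by
    rw [itemsA]
    intro a ha b hb hab
    obtain ⟨ka, _, rfl⟩ := List.mem_map.1 ha
    obtain ⟨kb, _, rfl⟩ := List.mem_map.1 hb
    simp only at hab
    simp [hab]
  rw [sorted2_eq_sorted_of_fst_inj _ hinj, itemsA]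
  exact PySem.List.sorted_eq_of_perm_of_pairwise_lt _ _ _ (canon_perm_items events) (pairwise_canon events)

-- ---- B side ----

theorem foldl_stepB_append (ys : List (Int × Int)) :
    ∀ (acc : List (Int × Int)) (x : Int × Int),
      ys.foldl stepB (acc ++ [x]) = acc ++ ys.foldl stepB [x] := by
  induction ys with
  | nil => intro acc x; rfl
  | cons y ys ih =>
    intro acc x
    have h1 : stepB (acc ++ [x]) y =
        if x.1 = y.1 then acc ++ [(x.1, x.2 + y.2)] else (acc ++ [x]) ++ [y] := by
      simp [stepB]
    have h2 : stepB [x] y = if x.1 = y.1 then [(x.1, x.2 + y.2)] else [x] ++ [y] := by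
      simp [stepB]
    by_cases hxy : x.1 = y.1
    · simp only [List.foldl_cons, h1, h2, if_pos hxy]
      exact ih acc _
    · simp only [List.foldl_cons, h1, h2, if_neg hxy]
      rw [ih (acc ++ [x]) y, ih [x] y, List.append_assoc]

theorem foldl_stepB_run (rest : List (Int × Int)) :
    ∀ (p v : Int), (∀ y ∈ rest, p ≤ y.1) → rest.Pairwise (fun a b => a.1 ≤ b.1) →
      rest.foldl stepB [(p, v)]
        = (p, v + ((rest.takeWhile (fun y => y.1 == p)).map (fun y => y.2)).sum)
            :: g (rest.dropWhile (fun y => y.1 == p)) := by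
  induction rest with
  | nil => intro p v _ _; simp [g]
  | cons y rest ih =>
    intro p v hlb hpw
    have hstep : stepB [(p, v)] y = if p = y.1 then [(p, v + y.2)] else [(p, v), y] := by
      by_cases h : p = y.1 <;> simp [stepB, h]
    by_cases hpy : p = y.1
    · have htw : (y :: rest).takeWhile (fun z => z.1 == p) = y :: rest.takeWhile (fun z => z.1 == p) := by
        simp [hpy.symm]
      have hdw : (y :: rest).dropWhile (fun z => z.1 == p) = rest.dropWhile (fun z => z.1 == p) := by
        simp [hpy.symm]
      rw [List.foldl_cons, hstep, if_pos hpy, ih p (v + y.2)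
        (fun z hz => hlb z (by simp [hz])) (List.Pairwise.sublist (List.sublist_cons_self y rest) hpw),
        htw, hdw]
      simp [add_assoc]
    · have hne : (y.1 == p) = false := by rw [beq_eq_false_iff_ne]; exact fun h => hpy h.symm
      have htw : (y :: rest).takeWhile (fun z => z.1 == p) = [] := by
        simp [hne]
      have hdw : (y :: rest).dropWhile (fun z => z.1 == p) = y :: rest := by
        simp [hne]
      rw [List.foldl_cons, hstep, if_neg hpy]
      have hys : rest.foldl stepB [y]
          = (y.1, y.2 + ((rest.takeWhile (fun z => z.1 == y.1)).map (fun z => z.2)).sum)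
              :: g (rest.dropWhile (fun z => z.1 == y.1)) := by
        exact ih y.1 y.2 (fun z hz => (List.pairwise_cons.1 hpw).1 z hz)
          (List.Pairwise.sublist (List.sublist_cons_self y rest) hpw)
      rw [htw, hdw,
        show ([(p, v), y] : List (Int × Int)) = [(p, v)] ++ [y] from rfl,
        foldl_stepB_append rest [(p, v)] y, hys]
      simp [g]

theorem foldB_eq_g (ys : List (Int × Int)) (hpw : ys.Pairwise (fun a b => a.1 ≤ b.1)) :
    ys.foldl stepB [] = g ys := by
  cases ys with
  | nil => simp [g]
  | cons e rest =>
    have h0 : stepB [] e = [(e.1, e.2)] := by simp [stepB]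
    rw [List.foldl_cons, h0,
      foldl_stepB_run rest e.1 e.2 (fun z hz => (List.pairwise_cons.1 hpw).1 z hz)
        (List.Pairwise.sublist (List.sublist_cons_self e rest) hpw)]
    simp [g]

-- Set.ofList building-block lemmas
theorem foldl_add_nochange (l : List Int) :
    ∀ (acc : List Int), (∀ x ∈ l, PySem.Set.contains acc x = true) →
      l.foldl PySem.Set.add acc = acc := by
  induction l with
  | nil => intro acc _; rfl
  | cons y l ih =>
    intro acc h
    simp only [List.foldl_cons, PySem.Set.add, h y (by simp), if_pos]
    exact ih acc (fun x hx => h x (by simp [hx]))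

theorem foldl_add_cons_acc (l : List Int) :
    ∀ (x : Int) (acc : List Int), (∀ y ∈ l, y ≠ x) →
      l.foldl PySem.Set.add (x :: acc) = x :: l.foldl PySem.Set.add acc := by
  induction l with
  | nil => intro x acc _; rfl
  | cons y l ih =>
    intro x acc h
    have hyx : y ≠ x := h y (by simp)
    have hc : PySem.Set.contains (x :: acc) y = PySem.Set.contains acc y := by
      simp [PySem.Set.contains, hyx]
    simp only [List.foldl_cons, PySem.Set.add, hc]
    by_cases hm : PySem.Set.contains acc y
    · simp only [hm, if_pos]
      exact ih x acc (fun z hz => h z (by simp [hz]))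
    · simp only [hm, Bool.false_eq_true, if_false]
      rw [show x :: acc ++ [y] = x :: (acc ++ [y]) from rfl]
      exact ih x (acc ++ [y]) (fun z hz => h z (by simp [hz]))

theorem foldl_add_sublist (l : List Int) :
    ∀ (acc : List Int), ∃ t, l.foldl PySem.Set.add acc = acc ++ t ∧ t.Sublist l := by
  induction l with
  | nil => intro acc; exact ⟨[], by simp⟩
  | cons y l ih =>
    intro acc
    simp only [List.foldl_cons, PySem.Set.add]
    by_cases hm : PySem.Set.contains acc y
    · simp only [hm, if_pos]
      obtain ⟨t, ht, hs⟩ := ih acc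
      exact ⟨t, ht, hs.cons y⟩
    · simp only [hm, Bool.false_eq_true, if_false]
      obtain ⟨t, ht, hs⟩ := ih (acc ++ [y])
      exact ⟨y :: t, by simp [ht], hs.cons₂ y⟩

theorem ofList_sublist (l : List Int) : (PySem.Set.ofList l).Sublist l := by
  obtain ⟨t, ht, hs⟩ := foldl_add_sublist l []
  simpa [PySem.Set.ofList, PySem.Set.empty, ht] using hs

-- first positions after the initial run are strictly larger (on a sorted list)
theorem dropWhile_gt (q : Int) : ∀ (rest : List (Int × Int)), (∀ y ∈ rest, q ≤ y.1) →
    rest.Pairwise (fun a b => a.1 ≤ b.1) →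
    ∀ y ∈ rest.dropWhile (fun z => z.1 == q), q < y.1 := by
  intro rest
  induction rest with
  | nil => intro _ _ y hy; simp at hy
  | cons z rs ih =>
    intro hlb hpw y hy
    by_cases hz : z.1 = q
    · rw [List.dropWhile_cons_of_pos (by simp [hz])] at hy
      exact ih (fun w hw => hlb w (by simp [hw]))
        (List.Pairwise.sublist (List.sublist_cons_self z rs) hpw) y hy
    · rw [List.dropWhile_cons_of_neg (by simp [hz])] at hy
      have hzq : q < z.1 := lt_of_le_of_ne (hlb z (by simp)) (fun h => hz h.symm)
      rcases List.mem_cons.1 hy with rfl | hmem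
      · exact hzq
      · exact lt_of_lt_of_le hzq ((List.pairwise_cons.1 hpw).1 y hmem)

theorem sumAt_append (p : Int) (a b : List (Int × Int)) :
    sumAt p (a ++ b) = sumAt p a + sumAt p b := by
  simp [sumAt]

-- grouping characterization on a position-sorted list
theorem gchar : ∀ (n : Nat) (ys : List (Int × Int)), ys.length ≤ n →
    ys.Pairwise (fun a b => a.1 ≤ b.1) →
    g ys = (PySem.Set.ofList (ys.map (fun e => e.1))).map (fun p => (p, sumAt p ys)) := by
  intro n
  induction n with
  | zero =>
    intro ys hlen _
    have : ys = [] := List.eq_nil_of_length_eq_zero (Nat.le_zero.1 hlen)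
    simp [this, g, PySem.Set.ofList, PySem.Set.empty]
  | succ n ih =>
    intro ys hlen hpw
    cases ys with
    | nil => simp [g, PySem.Set.ofList, PySem.Set.empty]
    | cons e rest =>
      have hrest_pw : rest.Pairwise (fun a b => a.1 ≤ b.1) :=
        List.Pairwise.sublist (List.sublist_cons_self e rest) hpw
      have hlb : ∀ y ∈ rest, e.1 ≤ y.1 := (List.pairwise_cons.1 hpw).1
      have htk_eq : ∀ y ∈ rest.takeWhile (fun z => z.1 == e.1), y.1 = e.1 := by
        intro y hy
        simpa using List.mem_takeWhile_imp hy
      have hdp_gt : ∀ y ∈ rest.dropWhile (fun z => z.1 == e.1), e.1 < y.1 :=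
        dropWhile_gt e.1 rest hlb hrest_pw
      have hdp_pw : (rest.dropWhile (fun z => z.1 == e.1)).Pairwise (fun a b => a.1 ≤ b.1) :=
        List.Pairwise.sublist (List.dropWhile_sublist _) hrest_pw
      have hdp_len : (rest.dropWhile (fun z => z.1 == e.1)).length ≤ n :=
        le_trans (List.length_dropWhile_le _ _) (by simpa using Nat.le_of_succ_le_succ hlen)
      have hIH := ih (rest.dropWhile (fun z => z.1 == e.1)) hdp_len hdp_pw
      -- left side: unfold one step of g
      have hg : g (e :: rest)
          = (e.1, e.2 + ((rest.takeWhile (fun z => z.1 == e.1)).map (fun y => y.2)).sum)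
              :: g (rest.dropWhile (fun z => z.1 == e.1)) := by
        simp [g]
      -- the set of positions splits
      have hofl : PySem.Set.ofList ((e :: rest).map (fun x => x.1))
          = e.1 :: PySem.Set.ofList ((rest.dropWhile (fun z => z.1 == e.1)).map (fun x => x.1)) := by
        have h0 : PySem.Set.ofList ((e :: rest).map (fun x => x.1))
            = (rest.map (fun x => x.1)).foldl PySem.Set.add [e.1] := by
          simp [PySem.Set.ofList, PySem.Set.empty, PySem.Set.add, PySem.Set.contains]
        rw [h0]
        conv_lhs => rw [← List.takeWhile_append_dropWhile (p := fun z => z.1 == e.1) (l := rest),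
          List.map_append, List.foldl_append]
        rw [foldl_add_nochange _ [e.1] (by
          intro x hx
          obtain ⟨y, hy, rfl⟩ := List.mem_map.1 hx
          simp [PySem.Set.contains, htk_eq y hy])]
        rw [foldl_add_cons_acc _ e.1 [] (by
          intro x hx
          obtain ⟨y, hy, rfl⟩ := List.mem_map.1 hx
          exact ne_of_gt (hdp_gt y hy))]
        rfl
      -- head sums agree
      have hsum_tk : sumAt e.1 (rest.takeWhile (fun z => z.1 == e.1))
          = ((rest.takeWhile (fun z => z.1 == e.1)).map (fun y => y.2)).sum := by
        unfold sumAt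
        rw [List.filter_eq_self.2 (by intro y hy; simpa using htk_eq y hy)]
      have hsum_dp0 : sumAt e.1 (rest.dropWhile (fun z => z.1 == e.1)) = 0 := by
        unfold sumAt
        rw [List.filter_eq_nil_iff.2 (by
          intro y hy
          simpa using ne_of_gt (hdp_gt y hy))]
        simp
      have hrest_sum : sumAt e.1 rest
          = ((rest.takeWhile (fun z => z.1 == e.1)).map (fun y => y.2)).sum := by
        conv_lhs => rw [← List.takeWhile_append_dropWhile (p := fun z => z.1 == e.1) (l := rest)]
        rw [sumAt_append, hsum_tk, hsum_dp0]
        ring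
      have hhead : sumAt e.1 (e :: rest)
          = e.2 + ((rest.takeWhile (fun z => z.1 == e.1)).map (fun y => y.2)).sum := by
        rw [sumAt_cons, if_pos rfl, hrest_sum]
      -- tail sums agree
      have htail : ∀ p ∈ PySem.Set.ofList ((rest.dropWhile (fun z => z.1 == e.1)).map (fun x => x.1)),
          sumAt p (e :: rest) = sumAt p (rest.dropWhile (fun z => z.1 == e.1)) := by
        intro p hp
        have hp' : p ∈ (rest.dropWhile (fun z => z.1 == e.1)).map (fun x => x.1) :=
          (PySem.Set.mem_ofList _ p).1 hp
        obtain ⟨y, hy, rfl⟩ := List.mem_map.1 hp'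
        have hgt : e.1 < y.1 := hdp_gt y hy
        have htk0 : sumAt y.1 (rest.takeWhile (fun z => z.1 == e.1)) = 0 := by
          unfold sumAt
          rw [List.filter_eq_nil_iff.2 (by
            intro w hw
            have := htk_eq w hw
            simp [this]
            exact ne_of_lt hgt)]
          simp
        have hrest_sum : sumAt y.1 rest = sumAt y.1 (rest.dropWhile (fun z => z.1 == e.1)) := by
          conv_lhs => rw [← List.takeWhile_append_dropWhile (p := fun z => z.1 == e.1) (l := rest)]
          rw [sumAt_append, htk0]
          ring
        rw [sumAt_cons, if_neg (by exact ne_of_lt hgt), hrest_sum]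
        ring
      rw [hg, hIH, hofl, List.map_cons, ← hhead]
      congr 1
      exact (List.map_congr_left (fun p hp => by rw [htail p hp])).symm

theorem B_eq_canon (events : List (Int × Int)) : cleanup_events_alt events = canon events := by
  unfold cleanup_events_alt
  have hpw : (PySem.List.sorted events (fun e => e.1) false).Pairwise (fun a b => a.1 ≤ b.1) :=
    PySem.List.sorted_pairwise events (fun e => e.1)
  rw [foldB_eq_g _ hpw, gchar _ _ (le_refl _) hpw]
  have hperm : (PySem.List.sorted events (fun e => e.1) false).Perm events :=
    PySem.List.sorted_perm events (fun e => e.1) false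
  have hsum : ∀ p, sumAt p (PySem.List.sorted events (fun e => e.1) false) = sumAt p events := by
    intro p
    exact ((hperm.filter _).map _).sum_eq
  have hset : PySem.Set.ofList ((PySem.List.sorted events (fun e => e.1) false).map (fun e => e.1))
      = PySem.List.sorted (PySem.Set.ofList (events.map (fun e => e.1))) (fun x => x) false := by
    refine (PySem.List.sorted_eq_of_perm_of_pairwise_lt _ _ _ ?_ ?_).symm
    · refine (List.perm_ext_iff_of_nodup (PySem.Set.nodup_ofList _) (PySem.Set.nodup_ofList _)).2 ?_
      intro a
      rw [PySem.Set.mem_ofList, PySem.Set.mem_ofList]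
      exact (hperm.map (fun e => e.1)).mem_iff
    · have hle : (PySem.Set.ofList ((PySem.List.sorted events (fun e => e.1) false).map (fun e => e.1))).Pairwise (fun a b => a ≤ b) :=
        List.Pairwise.sublist (ofList_sublist _)
          (PySem.List.sorted_map_key_pairwise events (fun e => e.1))
      have hne : (PySem.Set.ofList ((PySem.List.sorted events (fun e => e.1) false).map (fun e => e.1))).Pairwise (fun a b => a ≠ b) :=
        PySem.Set.nodup_ofList _
      exact (hle.and hne).imp (fun h => lt_of_le_of_ne h.1 h.2)
  unfold canon
  rw [hset]
  exact List.map_congr_left (fun p _ => by rw [hsum p])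

-- ===== VERDICT (by name: the statement is the Claim_ definition above) =====
theorem cleanup_events_spec : Claim_equal_cleanup_events := by
  intro events _
  unfold Spec_cleanup_events
  rw [A_eq_canon, B_eq_canon]
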